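-- pv_equiv track=rewrite | github.com/mrtsnElizabeth/exercise | 5.py | max_sum_index
-- ===== SOURCE A (Python) =====
-- def max_sum_index(tuples):
-- 	max_sum = float("-inf")
-- 	index = 0
-- 	tuple_index = 0
-- 	for tpl in tuples:
-- 		x = 0
-- 		for elem_tpl in tpl:
-- 			x += elem_tpl
--
-- 		if x > max_sum:
-- 			max_sum = x
-- 			index = tuple_index
-- 		tuple_index += 1
-- 	return index
-- ===== SOURCE B (Python) =====
-- def max_sum_index(tuples):
--     sums = [sum(t) for t in tuples]
--     order = sorted(range(len(sums)), key=lambda i: -sums[i])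
--     return order[0] if order else 0
-- ===== Notes on version B (the rewrite author's own statement) =====
-- stated objective: alternative
-- what changed: Replaces A's fused running-max scan (sentinel, best index, counter) with a sort-based argmax: build the per-tuple sums, stable-sort the index range by negated sum, and return the first index (empty input falls back to 0).
import Mathlib
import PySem

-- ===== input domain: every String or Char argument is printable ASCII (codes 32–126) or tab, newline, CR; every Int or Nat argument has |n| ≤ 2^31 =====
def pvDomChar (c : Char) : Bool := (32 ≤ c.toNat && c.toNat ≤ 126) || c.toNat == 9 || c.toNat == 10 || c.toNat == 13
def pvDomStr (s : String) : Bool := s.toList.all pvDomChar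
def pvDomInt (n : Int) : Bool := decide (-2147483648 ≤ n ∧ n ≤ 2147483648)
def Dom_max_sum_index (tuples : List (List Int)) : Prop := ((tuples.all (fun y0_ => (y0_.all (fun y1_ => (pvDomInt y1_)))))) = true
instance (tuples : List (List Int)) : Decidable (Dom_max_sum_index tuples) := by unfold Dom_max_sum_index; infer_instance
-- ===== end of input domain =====

-- B replaces A's fused running-max loop by a different algorithm: stable-sort the indices
-- by negated sum and take the first one (alternative; sorting costs more, not claimed faster).

-- ===== PORT A =====
-- python's `x = 0; for elem_tpl in tpl: x += elem_tpl`
def pvSumT (t : List Int) : Int := t.foldl (fun acc e => acc + e) 0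

-- loop body; float("-inf") is represented by `none` (every int compares greater than it)
def pvStepA (s : Option Int × Int × Int) (x : Int) : Option Int × Int × Int :=
  if (match s.1 with | none => true | some m => decide (m < x)) = true
  then (some x, s.2.2, s.2.2 + 1)
  else (s.1, s.2.1, s.2.2 + 1)

def max_sum_index (tuples : List (List Int)) : Int :=
  (tuples.foldl (fun s tpl => pvStepA s (pvSumT tpl)) ((none : Option Int), (0 : Int), (0 : Int))).2.1

-- ===== PORT B =====
-- key=lambda i: -sums[i]; range indices are always valid, so pyGetD with default 0 is exact here
def pvKeyB (sums : List Int) (i : Int) : Int := -(PySem.List.pyGetD sums i 0)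

def max_sum_index_alt (tuples : List (List Int)) : Int :=
  let sums := tuples.map (fun t => t.foldl (fun acc e => acc + e) 0)
  let order := PySem.List.sorted (PySem.List.pyRange 0 (sums.length : Int) 1) (pvKeyB sums)
  match order with
  | [] => 0                       -- `order[0] if order else 0`
  | i :: _ => i

-- ===== PRECONDITION & SPEC =====
def Spec_max_sum_index (tuples : List (List Int)) (out : Int) : Prop := out = max_sum_index_alt tuples
instance (tuples : List (List Int)) (out : Int) : Decidable (Spec_max_sum_index tuples out) := by unfold Spec_max_sum_index; infer_instance

-- ===== CLAIM (what is proved, stated in full; the proofs are below) =====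
def Claim_equal_max_sum_index : Prop := ∀ (tuples : List (List Int)), Dom_max_sum_index tuples → Spec_max_sum_index tuples (max_sum_index tuples)

-- ===== LEMMAS AND PROOFS =====

-- common recursive description of "first argmax, as running state"
def pvFam (m idx ti : Int) : List Int → Int
  | [] => idx
  | x :: rest => if m < x then pvFam x ti (ti + 1) rest else pvFam m idx (ti + 1) rest

theorem pvL1 (l : List Int) (m idx ti : Int) :
    ((l.foldl pvStepA (some m, idx, ti)).2.1) = pvFam m idx ti l := by
  induction l generalizing m idx ti with
  | nil => simp [pvFam]
  | cons x l ih =>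
    by_cases h : m < x <;> simp [pvStepA, pvFam, h, ih]

-- the head of an insertion-sort fold only ever changes when the new key is strictly smaller
theorem pvHead (before : Int → Int → Bool) (l : List Int) :
    ∀ (h : Int) (t : List Int), ∃ t',
      l.foldl (fun acc x => PySem.List.insertBy before x acc) (h :: t)
        = (l.foldl (fun best x => if before x best then x else best) h) :: t' := by
  induction l with
  | nil => intro h t; exact ⟨t, rfl⟩
  | cons x l ih =>
    intro h t
    by_cases hb : before x h
    · simpa [PySem.List.insertBy, hb] using ih x (h :: t)
    · simpa [PySem.List.insertBy, hb] using ih h (PySem.List.insertBy before x t)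

-- the running "best so far" over the remaining indices equals pvFam over the remaining sums
theorem pvL2 (rest : List Int) (sums : List Int) (k : Nat) (best : Int)
    (hd : sums.drop k = rest) :
    (PySem.List.pyRange (k : Int) (sums.length : Int) 1).foldl
        (fun b x => if pvKeyB sums x < pvKeyB sums b then x else b) best
      = pvFam (-(pvKeyB sums best)) best (k : Int) rest := by
  induction rest generalizing k best with
  | nil =>
    have hk : (sums.length : Int) ≤ (k : Int) := by
      have := congrArg List.length hd
      simp at this
      omega
    rw [PySem.List.pyRange_one_eq_nil hk]
    simp [pvFam]
  | cons x rest' ih =>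
    have hlt : k < sums.length := by
      have := congrArg List.length hd
      simp at this
      omega
    have hx : PySem.List.pyGetD sums (k : Int) 0 = x := by
      have h0 : (sums.drop k)[0]? = sums[k + 0]? := List.getElem?_drop
      rw [hd] at h0
      simp at h0
      rw [PySem.List.pyGetD_natCast]
      simp [List.getD_eq_getElem?_getD, ← h0]
    have hd' : sums.drop (k + 1) = rest' := by
      have : sums.drop (k + 1) = (sums.drop k).drop 1 := by rw [List.drop_drop]
      rw [this, hd]; simp
    have hc : (k : Int) < (sums.length : Int) := by exact_mod_cast hlt
    rw [PySem.List.pyRange_one_cons hc]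
    simp only [List.foldl_cons]
    have hkk : pvKeyB sums (k : Int) = -x := by simp [pvKeyB, hx]
    by_cases h : pvKeyB sums (k : Int) < pvKeyB sums best
    · rw [if_pos h]
      have := ih (k + 1) (k : Int) hd'
      push_cast at this ⊢
      rw [this, hkk]
      have hm : -(pvKeyB sums best) < x := by rw [hkk] at h; omega
      simp only [pvFam, if_pos hm, neg_neg]
    · rw [if_neg h]
      have := ih (k + 1) best hd'
      push_cast at this ⊢
      rw [this]
      have hm : ¬ (-(pvKeyB sums best) < x) := by rw [hkk] at h; omega
      simp only [pvFam, if_neg hm]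

-- ===== VERDICT (by name: the statement is the Claim_ definition above) =====
theorem max_sum_index_spec : Claim_equal_max_sum_index := by
  intro tuples _
  unfold Spec_max_sum_index max_sum_index max_sum_index_alt
  cases tuples with
  | nil =>
    simp [PySem.List.sorted_eq_foldl_insertBy, PySem.List.pyRange_one_eq_nil (le_refl (0 : Int))]
  | cons t ts =>
    simp only [List.map_cons, List.length_cons, List.foldl_cons]
    set sums : List Int := (t.foldl (fun acc e => acc + e) 0) :: ts.map (fun t => t.foldl (fun acc e => acc + e) 0) with hsums
    -- A side
    have hA : ((ts.foldl (fun s tpl => pvStepA s (pvSumT tpl))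
        (pvStepA ((none : Option Int), (0:Int), (0:Int)) (pvSumT t))).2.1)
        = pvFam (pvSumT t) 0 1 (ts.map pvSumT) := by
      have hfirst : pvStepA ((none : Option Int), (0:Int), (0:Int)) (pvSumT t) = (some (pvSumT t), 0, 1) := by
        simp [pvStepA]
      rw [hfirst, ← List.foldl_map (f := pvSumT), pvL1]
    -- B side
    have hn : (0 : Int) < ((ts.length + 1 : Nat) : Int) := by positivity
    have hsplit := PySem.List.pyRange_one_cons hn
    rw [PySem.List.sorted_eq_foldl_insertBy]
    simp only [List.length_map] at *
    rw [hsplit]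
    norm_num
    have hins : PySem.List.insertBy (fun a b => decide (pvKeyB sums a < pvKeyB sums b)) 0 ([] : List Int) = [0] := by
      simp [PySem.List.insertBy]
    rw [hins]
    obtain ⟨t', ht'⟩ := pvHead (fun a b => decide (pvKeyB sums a < pvKeyB sums b))
      (PySem.List.pyRange 1 ((ts.length + 1 : Nat) : Int) 1) 0 []
    push_cast at ht'
    rw [ht']
    simp only
    have h2 := pvL2 (ts.map pvSumT) sums 1 0 (by simp [hsums, pvSumT])
    have hlen : (sums.length : Int) = ((ts.length : Int) + 1) := by simp [hsums]
    have hkey0 : -(pvKeyB sums 0) = pvSumT t := by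
      simp [pvKeyB, hsums, PySem.List.pyGetD, PySem.List.pyGet?, PySem.List.pyIdx?, pvSumT]
    rw [hlen, hkey0] at h2
    push_cast at h2
    rw [hA, ← h2]
    simp only [decide_eq_true_eq]
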